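-- pv_equiv track=rewrite | github.com/KaroAntonio/the-past | parse_calendar.py | map_lanes
-- ===== SOURCE A (Python) =====
-- def parse_categories(evt_str):
-- 	imp = ['eating','sleep','work','hannah']
-- 	cats = []
-- 	if '#' in evt_str:
-- 		cats_str = evt_str.split('#')[1]
-- 		cats = [e.strip().lower() for e in cats_str.split(',') if e in imp]
-- 	if cats:
-- 		return cats
-- 	else:
-- 		return ['uncategorized']
--
-- def map_lanes(events):
-- 	lane_map = []
-- 	for evt in events:
-- 		cat = parse_categories(evt['id'])[0]
-- 		if cat not in lane_map:
-- 			lane_map += [cat]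
-- 		evt['lane'] = lane_map.index(cat)
--
-- 	return lane_map
-- ===== SOURCE B (Python) =====
-- def _first_cat(evt_str):
--     # first category of an event id string: first '#'-tag segment entry that is
--     # one of the important categories, else 'uncategorized'
--     if '#' in evt_str:
--         for e in evt_str.split('#')[1].split(','):
--             if e in ('eating', 'sleep', 'work', 'hannah'):
--                 return e.strip().lower()
--     return 'uncategorized'
--
-- def map_lanes(events):
--     cats = [_first_cat(evt['id']) for evt in events]
--     lane_map = list(dict.fromkeys(cats))
--     idx = {c: i for i, c in enumerate(lane_map)}
--     for evt, cat in zip(events, cats):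
--         evt['lane'] = idx[cat]
--     return lane_map
-- ===== Notes on version B (the rewrite author's own statement) =====
-- stated objective: alternative
-- what changed: B computes each event's first category with an early-return scan (no intermediate list), collects all categories in one pass, builds the lane table as an ordered dedup (dict.fromkeys) plus an index dict, and assigns lanes in a separate second pass, instead of A's interleaved incremental build with repeated list membership tests and .index scans.
import Mathlib
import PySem

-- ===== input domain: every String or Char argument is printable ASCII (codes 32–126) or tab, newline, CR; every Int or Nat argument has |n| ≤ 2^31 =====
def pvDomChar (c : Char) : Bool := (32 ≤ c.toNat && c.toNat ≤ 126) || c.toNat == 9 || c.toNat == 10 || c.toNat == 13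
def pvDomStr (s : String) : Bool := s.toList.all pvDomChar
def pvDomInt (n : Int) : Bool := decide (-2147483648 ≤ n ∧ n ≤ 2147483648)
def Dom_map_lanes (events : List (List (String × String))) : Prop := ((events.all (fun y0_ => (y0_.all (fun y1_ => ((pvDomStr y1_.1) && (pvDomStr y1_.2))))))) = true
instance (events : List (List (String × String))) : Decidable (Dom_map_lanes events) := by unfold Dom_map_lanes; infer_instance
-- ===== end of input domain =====

-- B builds the ordered lane table from all categories in two separate passes (dedup of a map)
-- instead of A's interleaved incremental build; equivalence is about the RETURN value only
-- (both Pythons also set evt['lane'] in place on the input dicts, identically; not modeled here).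

-- ===== PORT A =====
def parseCategories (s : String) : List String :=
  let imp : List String := ["eating", "sleep", "work", "hannah"]
  let cats : List String :=
    if PySem.Str.isIn "#" s then
      -- '#' in s guarantees split('#') has ≥ 2 parts, so the [1] index never raises; getD "" is unreachable
      (((PySem.Str.split? ((PySem.List.pyGet? ((PySem.Str.split? s "#").getD []) 1).getD "") ",").getD []).filter
          (fun e => imp.contains e)).map (fun e => PySem.Str.lower (PySem.Str.strip e))
    else []
  if cats ≠ [] then cats else ["uncategorized"]

def map_lanes (events : List (List (String × String))) : List String :=
  events.foldl (fun lane_map evt =>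
    -- evt['id'] raises KeyError when absent: excluded by Pre_; getD "" is unreachable under it.
    -- parse_categories always returns a nonempty list, so [0] never raises (headD "" unreachable).
    let cat := (parseCategories ((PySem.Dict.get? (PySem.Dict.mk evt) "id").getD "")).headD ""
    if !lane_map.contains cat then lane_map ++ [cat] else lane_map) []

-- ===== PORT B =====
def firstCat (s : String) : String :=
  if PySem.Str.isIn "#" s then
    match ((PySem.Str.split? ((PySem.List.pyGet? ((PySem.Str.split? s "#").getD []) 1).getD "") ",").getD []).find?
        (fun e => (["eating", "sleep", "work", "hannah"] : List String).contains e) with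
    | some e => PySem.Str.lower (PySem.Str.strip e)
    | none => "uncategorized"
  else "uncategorized"

def map_lanes_alt (events : List (List (String × String))) : List String :=
  let cats := events.map (fun evt => firstCat ((PySem.Dict.get? (PySem.Dict.mk evt) "id").getD ""))
  -- Source B's idx dict and the lane-assignment loop only mutate the input dicts; the return value is lane_map
  PySem.List.dedup cats

-- ===== PRECONDITION & SPEC =====
-- Pre_ excludes exactly the inputs where A raises KeyError: an event dict without key 'id'.
def Pre_map_lanes (events : List (List (String × String))) : Prop :=
  ∀ evt ∈ events, (PySem.Dict.get? (PySem.Dict.mk evt) "id").isSome = true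
instance (events : List (List (String × String))) : Decidable (Pre_map_lanes events) := by unfold Pre_map_lanes; infer_instance

def pvWitness_map_lanes : (List (List (String × String))) :=
  [[("id", "lunch #eating,work")], [("id", "nap #sleep")], [("id", "misc")]]

def Spec_map_lanes (events : List (List (String × String))) (out : List String) : Prop := out = map_lanes_alt events
instance (events : List (List (String × String))) (out : List String) : Decidable (Spec_map_lanes events out) := by unfold Spec_map_lanes; infer_instance

-- ===== CLAIM (what is proved, stated in full; the proofs are below) =====
def Claim_equal_map_lanes : Prop := ∀ (events : List (List (String × String))), Dom_map_lanes events → Pre_map_lanes events → Spec_map_lanes events (map_lanes events)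

-- ===== LEMMAS AND PROOFS =====

-- head of 'filtered-and-mapped list, or the fallback' = find?-based early return
lemma headD_filter_map (l : List String) (p : String → Bool) (f : String → String) :
    (if (l.filter p).map f ≠ [] then (l.filter p).map f else ["uncategorized"]).headD "" =
      (match l.find? p with | some e => f e | none => "uncategorized") := by
  induction l with
  | nil => simp
  | cons a t ih =>
    by_cases h : p a
    · simp [h]
    · simpa [List.filter_cons, h] using ih

lemma cat_eq (s : String) : (parseCategories s).headD "" = firstCat s := by
  cases h : PySem.Str.isIn "#" s with
  | true =>
    unfold parseCategories firstCat
    simp only [h, if_true]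
    exact headD_filter_map _ _ _
  | false =>
    have h' : PySem.Chars.isIn ['#'] s.toList = false := by simpa using h
    simp [parseCategories, firstCat, h']

-- ===== VERDICT (by name: the statement is the Claim_ definition above) =====
theorem map_lanes_spec : Claim_equal_map_lanes := by
  intro events _ _
  unfold Spec_map_lanes map_lanes map_lanes_alt
  simp only [PySem.List.dedup_eq_ofList, PySem.Set.ofList_eq_foldl, List.foldl_map]
  congr 1
  funext lm evt
  rw [cat_eq]
  by_cases h : lm.contains (firstCat ((PySem.Dict.get? (PySem.Dict.mk evt) "id").getD "")) <;>
    simp [PySem.Set.add]
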